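-- pv_equiv track=rewrite | github.com/nguyenhien7268-ship-it/git1 | logic/de_utils.py | get_4_touches_smart
-- ===== SOURCE A (Python) =====
-- BONG_DUONG_MAP = {0: 5, 1: 6, 2: 7, 3: 8, 4: 9, 5: 0, 6: 1, 7: 2, 8: 3, 9: 4}
--
-- def get_4_touches_smart(numbers_list):
--     """
--     (Giữ nguyên Logic cũ) Từ danh sách hạt giống trả về Chạm (Gốc + Bóng).
--     """
--     touches = set()
--     base_nums = [n % 10 for n in numbers_list]
--     for n in base_nums:
--         touches.add(n)
--
--     current_touches = list(touches)
--     for t in current_touches: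
--         touches.add(BONG_DUONG_MAP.get(t, (t+5)%10))
--
--     return sorted(list(touches))
-- ===== SOURCE B (Python) =====
-- def get_4_touches_smart(numbers_list):
--     # Fixed 5-slot presence table: shadow pairs {d, d+5} collapse to n % 5 classes.
--     # Mark each class, then emit digits 0..9 in order -- no set, no dict, no sort.
--     present = [False] * 5
--     for n in numbers_list:
--         present[n % 5] = True
--     return [d for d in range(10) if present[d % 5]]
-- ===== Notes on version B (the rewrite author's own statement) =====
-- stated objective: simpler
-- what changed: Replaces A's set-plus-shadow-dict-plus-sort pipeline with a fixed 5-slot boolean presence table marked in one pass and an ordered scan of the digits 0..9 that emits the result already sorted, eliminating sets, the lookup table and the sorting step.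
import Mathlib
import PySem

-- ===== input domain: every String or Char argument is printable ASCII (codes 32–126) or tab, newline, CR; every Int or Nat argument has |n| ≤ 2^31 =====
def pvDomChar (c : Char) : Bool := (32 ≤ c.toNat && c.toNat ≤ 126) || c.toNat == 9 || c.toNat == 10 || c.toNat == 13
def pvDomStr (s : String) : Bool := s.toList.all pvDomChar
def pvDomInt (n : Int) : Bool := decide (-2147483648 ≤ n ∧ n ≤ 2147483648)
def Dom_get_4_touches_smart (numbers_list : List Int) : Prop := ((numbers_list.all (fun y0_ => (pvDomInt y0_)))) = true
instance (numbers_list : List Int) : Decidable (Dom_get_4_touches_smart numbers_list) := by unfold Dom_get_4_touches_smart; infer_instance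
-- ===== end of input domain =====

-- B replaces A's set + shadow-dict + sort pipeline with a fixed 5-slot boolean
-- presence table (shadow pairs {d, d+5} collapse to n % 5 classes) marked in one
-- pass, then an ordered scan of digits 0..9 emits the result already sorted;
-- objective: simpler (no set, no lookup table, no sorting step).

-- ===== PORT A =====
def BONG_DUONG_MAP : PySem.Dict Int Int :=
  PySem.Dict.ofList [(0, 5), (1, 6), (2, 7), (3, 8), (4, 9), (5, 0), (6, 1), (7, 2), (8, 3), (9, 4)]

def get_4_touches_smart (numbers_list : List Int) : List Int :=
  let touches : PySem.Set Int := PySem.Set.empty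
  let base_nums := numbers_list.map (fun n => PySem.Int.mod n 10)
  let touches := base_nums.foldl (fun s n => PySem.Set.add s n) touches
  let current_touches := touches
  let touches := current_touches.foldl
    (fun s t => PySem.Set.add s (PySem.Dict.getD BONG_DUONG_MAP t (PySem.Int.mod (t + 5) 10))) touches
  PySem.List.sorted touches (fun x => x) false

-- ===== PORT B =====
def get_4_touches_smart_alt (numbers_list : List Int) : List Int :=
  let present := numbers_list.foldl
    (fun p n => PySem.List.pySetD p (PySem.Int.mod n 5) true) (List.replicate 5 false)
  (PySem.List.pyRange 0 10 1).filter
    (fun d => PySem.List.pyGetD present (PySem.Int.mod d 5) false)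

-- ===== PRECONDITION & SPEC =====
def Spec_get_4_touches_smart (numbers_list : List Int) (out : List Int) : Prop := out = get_4_touches_smart_alt numbers_list
instance (numbers_list : List Int) (out : List Int) : Decidable (Spec_get_4_touches_smart numbers_list out) := by unfold Spec_get_4_touches_smart; infer_instance

-- ===== CLAIM (what is proved, stated in full; the proofs are below) =====
def Claim_equal_get_4_touches_smart : Prop := ∀ (numbers_list : List Int), Dom_get_4_touches_smart numbers_list → Spec_get_4_touches_smart numbers_list (get_4_touches_smart numbers_list)

-- ===== LEMMAS AND PROOFS =====

theorem pmod10 (a : Int) : PySem.Int.mod a 10 = a % 10 :=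
  PySem.Int.mod_eq_emod_of_pos (by norm_num)

theorem pmod5 (a : Int) : PySem.Int.mod a 5 = a % 5 :=
  PySem.Int.mod_eq_emod_of_pos (by norm_num)

-- the shadow table is just (t+5) % 10 on its keys (and the default says the same)
theorem bong_eq (t : Int) (h0 : 0 ≤ t) (h10 : t < 10) :
    PySem.Dict.getD BONG_DUONG_MAP t ((t + 5) % 10) = (t + 5) % 10 := by
  interval_cases t <;> decide

theorem nodup_foldl_add1 (f : Int → Int) (l : List Int) (s : PySem.Set Int) (hs : s.Nodup) :
    (l.foldl (fun s r => PySem.Set.add s (f r)) s).Nodup := by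
  induction l generalizing s with
  | nil => exact hs
  | cons a l ih => exact ih _ (PySem.Set.nodup_add _ _ hs)

-- membership in A's final touches set
theorem mem_touches (l : List Int) (x : Int) :
    (x ∈ (((l.map (fun n => n % 10)).foldl (fun s n => PySem.Set.add s n)
        (PySem.Set.empty : PySem.Set Int)).foldl
        (fun s t => PySem.Set.add s (PySem.Dict.getD BONG_DUONG_MAP t ((t + 5) % 10)))
        ((l.map (fun n => n % 10)).foldl (fun s n => PySem.Set.add s n) PySem.Set.empty)))
      ↔ (0 ≤ x ∧ x < 10 ∧ ∃ n ∈ l, x % 5 = n % 5) := by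
  rw [PySem.Set.mem_foldl_add (f := fun t => PySem.Dict.getD BONG_DUONG_MAP t ((t + 5) % 10)),
      show (l.map (fun n => n % 10)).foldl (fun s n => PySem.Set.add s n) PySem.Set.empty
          = PySem.Set.ofList (l.map (fun n => n % 10)) from rfl]
  simp only [PySem.Set.mem_ofList, List.mem_map]
  constructor
  · rintro (⟨n, hn, rfl⟩ | ⟨t, ⟨n, hn, rfl⟩, hx⟩)
    · refine ⟨Int.emod_nonneg n (by norm_num), Int.emod_lt_of_pos n (by norm_num), n, hn, by omega⟩
    · rw [bong_eq _ (Int.emod_nonneg n (by norm_num)) (Int.emod_lt_of_pos n (by norm_num))] at hx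
      subst hx
      refine ⟨by omega, by omega, n, hn, by omega⟩
  · rintro ⟨h0, h10, n, hn, hx⟩
    by_cases h5 : x = n % 10
    · exact .inl ⟨n, hn, h5.symm⟩
    · refine .inr ⟨n % 10, ⟨n, hn, rfl⟩, ?_⟩
      rw [bong_eq _ (Int.emod_nonneg n (by norm_num)) (Int.emod_lt_of_pos n (by norm_num))]
      omega

-- the presence table: length is preserved, and slot i is marked iff some n % 5 = i
theorem mark_length (l : List Int) (p : List Bool) :
    (l.foldl (fun p n => PySem.List.pySetD p (PySem.Int.mod n 5) true) p).length = p.length := by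
  induction l generalizing p with
  | nil => rfl
  | cons a l ih => rw [List.foldl_cons, ih, PySem.List.length_pySetD]

theorem mark_getD (l : List Int) (p : List Bool) (hp : p.length = 5) (i : Nat) (hi : i < 5) :
    ((l.foldl (fun p n => PySem.List.pySetD p (PySem.Int.mod n 5) true) p).getD i false = true
      ↔ (p.getD i false = true ∨ ∃ n ∈ l, n % 5 = (i : Int))) := by
  induction l generalizing p with
  | nil => simp
  | cons a l ih =>
    rw [List.foldl_cons]
    have hnn : (0:Int) ≤ PySem.Int.mod a 5 := by rw [pmod5]; exact Int.emod_nonneg a (by norm_num)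
    have hlt : PySem.Int.mod a 5 < 5 := by rw [pmod5]; exact Int.emod_lt_of_pos a (by norm_num)
    rw [PySem.List.pySetD_of_nonneg _ _ hnn]
    rw [ih _ (by rw [List.length_set]; exact hp)]
    have hset : (p.set (PySem.Int.mod a 5).toNat true).getD i false
        = if (PySem.Int.mod a 5).toNat = i then true else p.getD i false := by
      by_cases h : (PySem.Int.mod a 5).toNat = i
      · subst h
        rw [List.getD_eq_getElem?_getD, List.getElem?_set_self (by omega)]
        simp
      · rw [if_neg h, List.getD_eq_getElem?_getD, List.getElem?_set_ne h,
            ← List.getD_eq_getElem?_getD]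
    rw [hset]
    constructor
    · rintro (h | h)
      · by_cases he : (PySem.Int.mod a 5).toNat = i
        · refine .inr ⟨a, List.mem_cons_self, ?_⟩
          rw [← pmod5]; omega
        · rw [if_neg he] at h; exact .inl h
      · obtain ⟨n, hn, hx⟩ := h
        exact .inr ⟨n, List.mem_cons_of_mem _ hn, hx⟩
    · rintro (h | ⟨n, hn, hx⟩)
      · left
        split_ifs with he
        · rfl
        · exact h
      · rcases List.mem_cons.mp hn with rfl | hn
      -- if this n is the head, the head's write marks slot i
        · left
          have : (PySem.Int.mod n 5).toNat = i := by rw [pmod5]; omega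
          rw [if_pos this]
        · exact .inr ⟨n, hn, hx⟩

-- membership in B's output list
theorem mem_alt (l : List Int) (x : Int) :
    (x ∈ get_4_touches_smart_alt l) ↔ (0 ≤ x ∧ x < 10 ∧ ∃ n ∈ l, x % 5 = n % 5) := by
  unfold get_4_touches_smart_alt
  simp only [List.mem_filter, PySem.List.mem_pyRange_one]
  have hlen : (l.foldl (fun p n => PySem.List.pySetD p (PySem.Int.mod n 5) true)
      (List.replicate 5 false)).length = 5 := by
    rw [mark_length, List.length_replicate]
  constructor
  · rintro ⟨⟨h0, h10⟩, hmark⟩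
    have hnn : (0:Int) ≤ PySem.Int.mod x 5 := by rw [pmod5]; exact Int.emod_nonneg x (by norm_num)
    have hlt5 : PySem.Int.mod x 5 < 5 := by rw [pmod5]; exact Int.emod_lt_of_pos x (by norm_num)
    rw [PySem.List.pyGetD_of_nonneg _ _ hnn] at hmark
    have hg := hmark
    rw [mark_getD l _ (by simp) _ (by omega)] at hg
    rcases hg with h | ⟨n, hn, hx⟩
    · rw [List.getD_eq_getElem?_getD, List.getElem?_replicate,
          if_pos (show (PySem.Int.mod x 5).toNat < 5 by omega)] at h
      simp at h
    · refine ⟨h0, h10, n, hn, ?_⟩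
      rw [pmod5] at hx; omega
  · rintro ⟨h0, h10, n, hn, hx⟩
    refine ⟨⟨h0, h10⟩, ?_⟩
    have hnn : (0:Int) ≤ PySem.Int.mod x 5 := by rw [pmod5]; exact Int.emod_nonneg x (by norm_num)
    have hlt5 : PySem.Int.mod x 5 < 5 := by rw [pmod5]; exact Int.emod_lt_of_pos x (by norm_num)
    rw [PySem.List.pyGetD_of_nonneg _ _ hnn]
    rw [mark_getD l _ (by simp) _ (by omega)]
    refine .inr ⟨n, hn, ?_⟩
    rw [pmod5]; omega

theorem alt_pairwise (l : List Int) : (get_4_touches_smart_alt l).Pairwise (· < ·) := by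
  unfold get_4_touches_smart_alt
  exact (PySem.List.pairwise_lt_pyRange_one 0 10).filter _

theorem alt_nodup (l : List Int) : (get_4_touches_smart_alt l).Nodup :=
  (alt_pairwise l).imp ne_of_lt

-- ===== VERDICT (by name: the statement is the Claim_ definition above) =====
theorem get_4_touches_smart_spec : Claim_equal_get_4_touches_smart := by
  intro l _
  unfold Spec_get_4_touches_smart
  show get_4_touches_smart l = get_4_touches_smart_alt l
  unfold get_4_touches_smart
  simp only [pmod10]
  apply PySem.List.sorted_eq_of_perm_of_pairwise_lt
  · apply (List.perm_ext_iff_of_nodup (alt_nodup l) ?_).mpr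
    · intro x
      rw [mem_alt, mem_touches]
    · exact nodup_foldl_add1 _ _ _ (nodup_foldl_add1 (fun n => n) _ _ List.nodup_nil)
  · exact alt_pairwise l
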